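-- pv_equiv track=rewrite | github.com/anmcn/ocpgdb | ocpgdb/cvtdecimal.py | _unpack_digits
-- ===== SOURCE A (Python) =====
-- def _unpack_digits(words):
--     shift = (1000, 100, 10, 1)
--     digits = []
--     for word in words:
--         for s in shift:
--             d = word // s % 10
--             if digits or d:
--                 digits.append(d)
--     return tuple(digits)
-- ===== SOURCE B (Python) =====
-- def _unpack_digits(words):
--     # Pack all words into one big integer (each word contributes its value mod
--     # 10**4 as one base-10000 limb), then read off that integer's decimal digits.
--     n = 0
--     for word in words:
--         n = n * 10000 + word % 10000
--     digits = []
--     while n: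
--         digits.append(n % 10)
--         n //= 10
--     digits.reverse()
--     return tuple(digits)
-- ===== Notes on version B (the rewrite author's own statement) =====
-- stated objective: alternative
-- what changed: B replaces A's digit-by-digit filtered accumulation by arithmetic: it packs all words into a single big integer (base-10000 limbs, each word taken mod 10000), then reads off that integer's decimal digits, which drops leading zeros automatically.
import Mathlib
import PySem

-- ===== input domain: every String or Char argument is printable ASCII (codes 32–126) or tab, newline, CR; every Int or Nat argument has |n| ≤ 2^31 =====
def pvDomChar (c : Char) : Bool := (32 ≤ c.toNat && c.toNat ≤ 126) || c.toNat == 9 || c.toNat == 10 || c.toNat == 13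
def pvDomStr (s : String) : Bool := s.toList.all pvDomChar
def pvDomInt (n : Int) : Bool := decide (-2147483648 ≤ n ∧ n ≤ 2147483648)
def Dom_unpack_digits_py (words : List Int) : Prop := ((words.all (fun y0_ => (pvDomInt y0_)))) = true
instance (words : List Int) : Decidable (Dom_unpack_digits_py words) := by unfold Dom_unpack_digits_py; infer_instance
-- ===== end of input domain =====

-- B replaces A's filtered digit-by-digit accumulation by arithmetic: it packs the words
-- into one integer (base-10000 limbs, each word taken mod 10000) and reads off that
-- integer's decimal digits, which drops leading zeros automatically (objective: alternative).

-- ===== PORT A =====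
def unpack_digits_py (words : List Int) : List Int :=
  words.foldl (fun digits word =>
    ([1000, 100, 10, 1] : List Int).foldl (fun digits s =>
      let d := PySem.Int.mod (PySem.Int.floordiv word s) 10
      if digits ≠ [] ∨ d ≠ 0 then digits ++ [d] else digits) digits) []

-- ===== PORT B =====
-- Source B's 'while n: digits.append(n % 10); n //= 10'. Python's truthiness test 'while n:'
-- is rendered as '0 < n' to make the recursion total; the packed value fed to the loop is
-- always ≥ 0 (each limb is a nonnegative Python mod), so the behaviour is identical there.
def pyDigitLoop (n : Int) (digits : List Int) : List Int :=
  if _h : 0 < n then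
    pyDigitLoop (PySem.Int.floordiv n 10) (digits ++ [PySem.Int.mod n 10])
  else digits
termination_by n.toNat
decreasing_by
  rw [PySem.Int.floordiv_eq_ediv_of_pos (by omega : (0:Int) < 10)]
  omega

def unpack_digits_py_alt (words : List Int) : List Int :=
  (pyDigitLoop (words.foldl (fun n word => n * 10000 + PySem.Int.mod word 10000) 0) []).reverse

-- ===== PRECONDITION & SPEC =====
def Spec_unpack_digits_py (words : List Int) (out : List Int) : Prop := out = unpack_digits_py_alt words
instance (words : List Int) (out : List Int) : Decidable (Spec_unpack_digits_py words out) := by unfold Spec_unpack_digits_py; infer_instance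

-- ===== CLAIM (what is proved, stated in full; the proofs are below) =====
def Claim_equal_unpack_digits_py : Prop := ∀ (words : List Int), Dom_unpack_digits_py words → Spec_unpack_digits_py words (unpack_digits_py words)

-- ===== LEMMAS AND PROOFS =====

-- A's inner-loop step, abstracted over the already-computed digit
def pvStep (acc : List Int) (d : Int) : List Int :=
  if acc ≠ [] ∨ d ≠ 0 then acc ++ [d] else acc

-- the four digits A extracts from one word
def pvDigitsOf (word : Int) : List Int :=
  [PySem.Int.mod (PySem.Int.floordiv word 1000) 10,
   PySem.Int.mod (PySem.Int.floordiv word 100) 10,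
   PySem.Int.mod (PySem.Int.floordiv word 10) 10,
   PySem.Int.mod (PySem.Int.floordiv word 1) 10]

-- the same four digits of a nonnegative r < 10000, in Lean's Euclidean arithmetic
def pvD4 (r : Int) : List Int := [r / 1000 % 10, r / 100 % 10, r / 10 % 10, r % 10]

-- drop the leading run of zeros (proof-side characterisation of A's filtering)
def pyStripZeros : List Int → List Int
  | [] => []
  | d :: rest => if d = 0 then pyStripZeros rest else d :: rest

-- the digit loop with empty accumulator (least-significant digit first)
def pvG (n : Int) : List Int := pyDigitLoop n []

-- the packed value
def pvN (words : List Int) : Int :=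
  words.foldl (fun n word => n * 10000 + PySem.Int.mod word 10000) 0

theorem pvStep_nonempty (acc : List Int) (h : acc ≠ []) (ds : List Int) :
    ds.foldl pvStep acc = acc ++ ds := by
  induction ds generalizing acc with
  | nil => simp
  | cons d ds ih =>
      simp only [List.foldl_cons, pvStep, if_pos (Or.inl h)]
      rw [ih _ (by simp)]
      simp

theorem pvStep_empty (ds : List Int) : ds.foldl pvStep [] = pyStripZeros ds := by
  induction ds with
  | nil => rfl
  | cons d ds ih =>
      by_cases hd : d = 0
      · simp [pvStep, pyStripZeros, hd, ih]
      · simp [pvStep, pyStripZeros, hd, pvStep_nonempty]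

theorem pvA_eq_step (words : List Int) (acc : List Int) :
    words.foldl (fun digits word =>
      ([1000, 100, 10, 1] : List Int).foldl (fun digits s =>
        let d := PySem.Int.mod (PySem.Int.floordiv word s) 10
        if digits ≠ [] ∨ d ≠ 0 then digits ++ [d] else digits) digits) acc
    = (words.flatMap pvDigitsOf).foldl pvStep acc := by
  induction words generalizing acc with
  | nil => rfl
  | cons w ws ih =>
      rw [List.foldl_cons, List.flatMap_cons, List.foldl_append]
      exact ih _

theorem pvStrip_append (xs ys : List Int) :
    pyStripZeros (xs ++ ys) =
      if pyStripZeros xs = [] then pyStripZeros ys else pyStripZeros xs ++ ys := by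
  induction xs with
  | nil => simp [pyStripZeros]
  | cons d xs ih =>
      by_cases hd : d = 0
      · simpa [pyStripZeros, hd] using ih
      · simp [pyStripZeros, hd]

-- each of A's four digits depends only on the word mod 10000
theorem pvDigitsOf_eq (w : Int) : pvDigitsOf w = pvD4 (PySem.Int.mod w 10000) := by
  have hm := PySem.Int.mod_eq_emod_of_pos (a := w) (b := 10000) (by omega)
  simp only [pvDigitsOf, pvD4,
    PySem.Int.floordiv_eq_ediv_of_pos (b := 1000) (by omega),
    PySem.Int.floordiv_eq_ediv_of_pos (b := 100) (by omega),
    PySem.Int.floordiv_eq_ediv_of_pos (b := 10) (by omega),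
    PySem.Int.floordiv_eq_ediv_of_pos (b := 1) (by omega),
    PySem.Int.mod_eq_emod_of_pos (b := 10) (by omega), hm]
  simp only [List.cons.injEq, and_true]
  omega

theorem pyDigitLoop_acc (k : Nat) : ∀ (m : Int), m.toNat ≤ k → ∀ acc : List Int,
    pyDigitLoop m acc = acc ++ pyDigitLoop m [] := by
  induction k with
  | zero =>
      intro m hm acc
      have h0 : ¬ 0 < m := by omega
      rw [pyDigitLoop, dif_neg h0, pyDigitLoop, dif_neg h0, List.append_nil]
  | succ k ih =>
      intro m hm acc
      by_cases h0 : 0 < m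
      · have hdiv : (PySem.Int.floordiv m 10).toNat ≤ k := by
          rw [PySem.Int.floordiv_eq_ediv_of_pos (by omega : (0:Int) < 10)]
          omega
        conv_lhs => rw [pyDigitLoop, dif_pos h0]
        conv_rhs => rw [pyDigitLoop, dif_pos h0]
        rw [ih _ hdiv, ih _ hdiv (([] : List Int) ++ [PySem.Int.mod m 10])]
        simp
      · rw [pyDigitLoop, dif_neg h0, pyDigitLoop, dif_neg h0, List.append_nil]

theorem pvG_pos (n : Int) (h : 0 < n) : pvG n = n % 10 :: pvG (n / 10) := by
  rw [pvG, pyDigitLoop, dif_pos h,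
    pyDigitLoop_acc (PySem.Int.floordiv n 10).toNat _ le_rfl,
    PySem.Int.floordiv_eq_ediv_of_pos (by omega : (0:Int) < 10),
    PySem.Int.mod_eq_emod_of_pos (by omega : (0:Int) < 10)]
  simp [pvG]

theorem pvG_nonpos (n : Int) (h : ¬ 0 < n) : pvG n = [] := by
  rw [pvG, pyDigitLoop, dif_neg h]

-- one base-10000 limb: digits of a*10000+r are the four digits of r followed by digits of a
theorem pvG_limb (a r : Int) (ha : 0 < a) (hr0 : 0 ≤ r) (hr1 : r < 10000) :
    pvG (a * 10000 + r) = (pvD4 r).reverse ++ pvG a := by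
  have h1 : (a * 10000 + r) / 10 = a * 1000 + r / 10 := by omega
  have h2 : (a * 1000 + r / 10) / 10 = a * 100 + r / 100 := by omega
  have h3 : (a * 100 + r / 100) / 10 = a * 10 + r / 1000 := by omega
  have h4 : (a * 10 + r / 1000) / 10 = a := by omega
  rw [pvG_pos _ (by omega), h1, pvG_pos _ (by omega), h2, pvG_pos _ (by omega), h3,
    pvG_pos _ (by omega), h4]
  simp only [pvD4, List.reverse_cons, List.reverse_nil, List.nil_append, List.cons_append]
  have e1 : (a * 10000 + r) % 10 = r % 10 := by omega
  have e2 : (a * 1000 + r / 10) % 10 = r / 10 % 10 := by omega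
  have e3 : (a * 100 + r / 100) % 10 = r / 100 % 10 := by omega
  have e4 : (a * 10 + r / 1000) % 10 = r / 1000 % 10 := by omega
  rw [e1, e2, e3, e4]

-- base case: the decimal digits of 0 ≤ r < 10000 are its four digits with leading zeros stripped
theorem pvG_base (r : Int) (hr0 : 0 ≤ r) (hr1 : r < 10000) :
    pvG r = (pyStripZeros (pvD4 r)).reverse := by
  by_cases c4 : 1000 ≤ r
  · have e2 : r / 10 / 10 = r / 100 := by omega
    have e3 : r / 100 / 10 = r / 1000 := by omega
    have hz : r / 1000 / 10 = 0 := by omega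
    rw [pvG_pos _ (by omega), pvG_pos _ (by omega), e2, pvG_pos _ (by omega), e3,
      pvG_pos _ (by omega), hz, pvG_nonpos _ (by omega)]
    have hnz : ¬ (r / 1000 % 10 = 0) := by omega
    simp [pvD4, pyStripZeros, hnz]
  · by_cases c3 : 100 ≤ r
    · have e2 : r / 10 / 10 = r / 100 := by omega
      have hz : r / 100 / 10 = 0 := by omega
      rw [pvG_pos _ (by omega), pvG_pos _ (by omega), e2, pvG_pos _ (by omega), hz,
        pvG_nonpos _ (by omega)]
      have h1 : r / 1000 % 10 = 0 := by omega
      have hnz : ¬ (r / 100 % 10 = 0) := by omega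
      simp [pvD4, pyStripZeros, h1, hnz]
    · by_cases c2 : 10 ≤ r
      · have hz : r / 10 / 10 = 0 := by omega
        rw [pvG_pos _ (by omega), pvG_pos _ (by omega), hz, pvG_nonpos _ (by omega)]
        have h1 : r / 1000 % 10 = 0 := by omega
        have h2 : r / 100 % 10 = 0 := by omega
        have hnz : ¬ (r / 10 % 10 = 0) := by omega
        simp [pvD4, pyStripZeros, h1, h2, hnz]
      · by_cases c1 : 1 ≤ r
        · have hz : r / 10 = 0 := by omega
          rw [pvG_pos _ (by omega), hz, pvG_nonpos _ (by omega)]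
          have h1 : r / 1000 % 10 = 0 := by omega
          have h2 : r / 100 % 10 = 0 := by omega
          have h3 : r / 10 % 10 = 0 := by omega
          have hnz : ¬ (r % 10 = 0) := by omega
          simp [pvD4, pyStripZeros, h1, h2, h3, hnz]
        · have hr : r = 0 := by omega
          subst hr
          rw [pvG_nonpos _ (by omega)]
          simp [pvD4, pyStripZeros]

theorem pvN_append (ws : List Int) (w : Int) :
    pvN (ws ++ [w]) = pvN ws * 10000 + PySem.Int.mod w 10000 := by
  simp [pvN, List.foldl_append]

theorem pvMain (words : List Int) :
    0 ≤ pvN words ∧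
      pyStripZeros (words.flatMap pvDigitsOf) = (pvG (pvN words)).reverse := by
  induction words using List.reverseRecOn with
  | nil =>
      refine ⟨le_refl 0, ?_⟩
      rw [show pvN [] = 0 from rfl, pvG_nonpos _ (by omega)]
      rfl
  | append_singleton ws w ih =>
      obtain ⟨ha, heq⟩ := ih
      have hm := PySem.Int.mod_eq_emod_of_pos (a := w) (b := 10000) (by omega)
      have hr0 : 0 ≤ PySem.Int.mod w 10000 := by rw [hm]; omega
      have hr1 : PySem.Int.mod w 10000 < 10000 := by rw [hm]; omega
      refine ⟨by rw [pvN_append]; omega, ?_⟩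
      rw [pvN_append, List.flatMap_append, pvStrip_append, heq,
        show ([w].flatMap pvDigitsOf) = pvDigitsOf w from by simp, pvDigitsOf_eq]
      by_cases hz : 0 < pvN ws
      · have hne : (pvG (pvN ws)).reverse ≠ [] := by
          rw [pvG_pos _ hz]; simp
        rw [if_neg hne, pvG_limb (pvN ws) _ hz hr0 hr1]
        simp
      · have haz : pvN ws = 0 := by omega
        rw [haz, pvG_nonpos 0 (by omega),
          show (0:Int) * 10000 + PySem.Int.mod w 10000 = PySem.Int.mod w 10000 from by ring,
          pvG_base _ hr0 hr1, List.reverse_reverse]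
        simp

-- ===== VERDICT (by name: the statement is the Claim_ definition above) =====
theorem unpack_digits_py_spec : Claim_equal_unpack_digits_py := by
  intro words _
  show unpack_digits_py words = unpack_digits_py_alt words
  unfold unpack_digits_py unpack_digits_py_alt
  rw [pvA_eq_step, pvStep_empty]
  exact (pvMain words).2
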